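-- pv_equiv track=rewrite | github.com/kmad1729/basic_ds | general_questions/create_regex_matcher.py | tokenize_inp_pattern
-- ===== SOURCE A (Python) =====
-- def tokenize_inp_pattern(ptrn):
--     result = []
--     i = 0
--     while i < len(ptrn):
--         if i!= len(ptrn) - 1 and ptrn[i+1] in ['?', '*']:
--             result.append(ptrn[i:i+2])
--             i += 2
--         else:
--             result.append(ptrn[i:i+1])
--             i += 1
--
--     i = 0
--     new_result = []
--     while i < len(result):
--         tok = result[i]
--         if len(tok) == 2 and tok[0] != '.' and tok[-1] == '*':
--             new_result.append(tok)
--             i += 1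
--             while i < len(result) and result[i][-1] in ['?', '*'] and result[i][0] == tok[0]:
--                 i +=1
--         else:
--             new_result.append(tok)
--             i += 1
--
--
--     return new_result
-- ===== SOURCE B (Python) =====
-- def tokenize_inp_pattern(ptrn):
--     out = []
--     base = None  # base char of the last emitted 'x*' star token (x != '.'), else None
--     i = 0
--     n = len(ptrn)
--     while i < n:
--         if i + 1 < n and ptrn[i + 1] in ('?', '*'):
--             tok = ptrn[i:i + 2]
--             i += 2
--         else:
--             tok = ptrn[i]
--             i += 1
--         if base is not None and tok[-1] in ('?', '*') and tok[0] == base: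
--             continue  # swallowed by the pending star token
--         out.append(tok)
--         base = tok[0] if len(tok) == 2 and tok[0] != '.' and tok[1] == '*' else None
--     return out
-- ===== Notes on version B (the rewrite author's own statement) =====
-- stated objective: alternative
-- what changed: A builds an intermediate token list and then collapses duplicate star tokens in a second pass with a nested skip loop; B fuses both passes into a single scan over the raw string, forming each 1- or 2-char token in place and dropping swallowed tokens by tracking the base char of the last emitted star token, never materialising the token list.
import Mathlib
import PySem

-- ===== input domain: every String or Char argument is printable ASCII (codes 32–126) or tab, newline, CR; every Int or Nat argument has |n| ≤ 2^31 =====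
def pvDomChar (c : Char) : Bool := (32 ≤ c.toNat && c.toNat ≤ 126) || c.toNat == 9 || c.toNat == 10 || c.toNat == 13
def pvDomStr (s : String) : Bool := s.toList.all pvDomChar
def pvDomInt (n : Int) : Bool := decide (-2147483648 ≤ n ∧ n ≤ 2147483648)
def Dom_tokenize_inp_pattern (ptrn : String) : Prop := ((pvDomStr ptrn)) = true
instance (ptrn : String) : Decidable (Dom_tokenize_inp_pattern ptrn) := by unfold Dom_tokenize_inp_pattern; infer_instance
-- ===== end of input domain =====

-- B fuses A's two passes (tokenize, then collapse duplicate star tokens) into one scan over the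
-- string that tracks the pending star base char; same return value, no intermediate token list.

-- Tokens are modelled as nonempty lists of chars; both ports map String.mk over them at the end.
-- tok[0] and tok[-1] of a (nonempty) token:
def pvHeadCh (t : List Char) : Char := t.headD ' '
def pvLastCh (t : List Char) : Char := (t.getLast?).getD ' '

-- ===== PORT A =====
-- A's first while loop: split ptrn into 1- or 2-char tokens ('?'/'*' glue to the previous char
-- unless that '?'/'*' is the last character).
def pvPass1 : List Char → List (List Char)
  | [] => []
  | [c] => [[c]]
  | c :: d :: rest =>
      if d = '?' ∨ d = '*' then [c, d] :: pvPass1 rest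
      else [c] :: pvPass1 (d :: rest)

-- A's inner while loop: skip the run of tokens ending in '?'/'*' whose first char is x.
def pvSkipRun (x : Char) : List (List Char) → List (List Char)
  | [] => []
  | t :: ts =>
      if (pvLastCh t = '?' ∨ pvLastCh t = '*') ∧ pvHeadCh t = x then pvSkipRun x ts
      else t :: ts

theorem pvSkipRun_length_le (x : Char) (ts : List (List Char)) :
    (pvSkipRun x ts).length ≤ ts.length := by
  induction ts with
  | nil => simp [pvSkipRun]
  | cons t ts ih =>
      simp only [pvSkipRun]
      split
      · exact Nat.le_trans ih (Nat.le_succ _)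
      · simp

-- A's second while loop.
def pvPass2 : List (List Char) → List (List Char)
  | [] => []
  | t :: ts =>
      if t.length = 2 ∧ pvHeadCh t ≠ '.' ∧ pvLastCh t = '*' then
        t :: pvPass2 (pvSkipRun (pvHeadCh t) ts)
      else
        t :: pvPass2 ts
termination_by ts => ts.length
decreasing_by
  · exact Nat.lt_succ_of_le (pvSkipRun_length_le _ _)
  · exact Nat.lt_succ_self _

def tokenize_inp_pattern (ptrn : String) : List String :=
  (pvPass2 (pvPass1 ptrn.toList)).map String.mk

-- ===== PORT B =====
-- 'base is not None and tok[-1] in ('?','*') and tok[0] == base'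
def pvSkipP (base : Option Char) (t : List Char) : Bool :=
  match base with
  | none => false
  | some x => decide ((pvLastCh t = '?' ∨ pvLastCh t = '*') ∧ pvHeadCh t = x)

-- 'tok[0] if len(tok) == 2 and tok[0] != '.' and tok[1] == '*' else None'
def pvNewBase (t : List Char) : Option Char :=
  if t.length = 2 ∧ pvHeadCh t ≠ '.' ∧ pvLastCh t = '*' then some (pvHeadCh t) else none

-- B's single while loop: form the next 1- or 2-char token, drop it if swallowed by the pending
-- star base, otherwise emit it and update the base.
def pvScan : Option Char → List Char → List (List Char)
  | _, [] => []
  | base, [c] => if pvSkipP base [c] then [] else [[c]]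
  | base, c :: d :: rest =>
      if d = '?' ∨ d = '*' then
        if pvSkipP base [c, d] then pvScan base rest
        else [c, d] :: pvScan (pvNewBase [c, d]) rest
      else
        if pvSkipP base [c] then pvScan base (d :: rest)
        else [c] :: pvScan (pvNewBase [c]) (d :: rest)

def tokenize_inp_pattern_alt (ptrn : String) : List String :=
  (pvScan none ptrn.toList).map String.mk

-- ===== PRECONDITION & SPEC =====
def Spec_tokenize_inp_pattern (ptrn : String) (out : List String) : Prop := out = tokenize_inp_pattern_alt ptrn
instance (ptrn : String) (out : List String) : Decidable (Spec_tokenize_inp_pattern ptrn out) := by unfold Spec_tokenize_inp_pattern; infer_instance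

-- ===== CLAIM (what is proved, stated in full; the proofs are below) =====
def Claim_equal_tokenize_inp_pattern : Prop := ∀ (ptrn : String), Dom_tokenize_inp_pattern ptrn → Spec_tokenize_inp_pattern ptrn (tokenize_inp_pattern ptrn)

-- ===== LEMMAS AND PROOFS =====

-- Key invariant: B's scan with pending base x equals A's pass2 run on the still-untokenized
-- suffix after A's skip loop for x; with no pending base it is pass2 of pass1.
theorem pvScan_eq (n : ℕ) : ∀ l : List Char, l.length ≤ n →
    pvScan none l = pvPass2 (pvPass1 l) ∧
    ∀ x : Char, pvScan (some x) l = pvPass2 (pvSkipRun x (pvPass1 l)) := by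
  induction n with
  | zero =>
      intro l hl
      have : l = [] := List.length_eq_zero_iff.mp (Nat.le_zero.mp hl)
      subst this
      simp [pvScan, pvPass1, pvSkipRun, pvPass2]
  | succ n ih =>
      intro l hl
      match l with
      | [] => simp [pvScan, pvPass1, pvSkipRun, pvPass2]
      | [c] =>
          constructor
          · simp [pvScan, pvSkipP, pvPass1, pvPass2, pvHeadCh, pvLastCh]
          · intro x
            simp only [pvScan, pvPass1, pvSkipRun, pvSkipP, pvHeadCh, List.headD, decide_eq_true_eq]
            split_ifs <;> simp [pvPass2, pvHeadCh]
      | c :: d :: rest =>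
          have hrest : rest.length ≤ n := by simpa using Nat.le_of_succ_le_succ (Nat.le_of_succ_le hl)
          have hdrest : (d :: rest).length ≤ n := by simpa using Nat.le_of_succ_le_succ hl
          by_cases hd : d = '?' ∨ d = '*'
          · -- two-char token [c, d]
            have emit : [c, d] :: pvScan (pvNewBase [c, d]) rest = pvPass2 ([c, d] :: pvPass1 rest) := by
              simp only [pvPass2, pvNewBase]
              split_ifs with h
              · exact congrArg _ ((ih rest hrest).2 _)
              · exact congrArg _ (ih rest hrest).1
            constructor
            · simp only [pvScan, hd, if_true, pvSkipP, Bool.false_eq_true, if_false]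
              simpa [pvPass1, hd] using emit
            · intro x
              simp only [pvScan, hd, if_true, pvSkipP, pvPass1, pvSkipRun]
              by_cases hskip : (pvLastCh [c, d] = '?' ∨ pvLastCh [c, d] = '*') ∧ pvHeadCh [c, d] = x
              · simp [hskip, (ih rest hrest).2]
              · simpa [hskip] using emit
          · -- one-char token [c]
            have emit : [c] :: pvScan (pvNewBase [c]) (d :: rest) = pvPass2 ([c] :: pvPass1 (d :: rest)) := by
              simp [pvPass2, pvNewBase, (ih (d :: rest) hdrest).1]
            constructor
            · simp only [pvScan, hd, if_false, pvSkipP, Bool.false_eq_true]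
              simpa [pvPass1, hd] using emit
            · intro x
              simp only [pvScan, hd, if_false, pvSkipP, pvPass1, pvSkipRun]
              by_cases hskip : (pvLastCh [c] = '?' ∨ pvLastCh [c] = '*') ∧ pvHeadCh [c] = x
              · simp [hskip, (ih (d :: rest) hdrest).2]
              · simpa [hskip] using emit

-- ===== VERDICT (by name: the statement is the Claim_ definition above) =====
theorem tokenize_inp_pattern_spec : Claim_equal_tokenize_inp_pattern := by
  intro ptrn _
  unfold Spec_tokenize_inp_pattern tokenize_inp_pattern tokenize_inp_pattern_alt
  rw [(pvScan_eq ptrn.toList.length ptrn.toList (le_refl _)).1]
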